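-- pv_equiv track=rewrite | github.com/jevanvangelder/ClarusAI | backend/app/api/ebooks.py | detect_cover_emoji
-- ===== SOURCE A (Python) =====
-- def detect_cover_emoji(file_name: str) -> str:
--     lower = file_name.lower()
--     if any(w in lower for w in ['wiskunde', 'math', 'rekenen']):
--         return '📕'
--     elif any(w in lower for w in ['engels', 'english']):
--         return '📘'
--     elif any(w in lower for w in ['biologie', 'biology', 'bio']):
--         return '📗'
--     elif any(w in lower for w in ['natuur', 'physics', 'scheikunde', 'chemistry']):
--         return '📙'
--     elif any(w in lower for w in ['geschied', 'history']):
--         return '📔'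
--     elif any(w in lower for w in ['aard', 'geo']):
--         return '🗺️'
--     elif any(w in lower for w in ['nederland', 'dutch']):
--         return '📖'
--     else:
--         return '📘'
-- ===== SOURCE B (Python) =====
-- # flat keyword -> priority map; min matched priority indexes the emoji array (7 = default)
-- _KEYWORD_RANK = [
--     ('wiskunde', 0), ('math', 0), ('rekenen', 0),
--     ('engels', 1), ('english', 1),
--     ('biologie', 2), ('biology', 2), ('bio', 2),
--     ('natuur', 3), ('physics', 3), ('scheikunde', 3), ('chemistry', 3),
--     ('geschied', 4), ('history', 4),
--     ('aard', 5), ('geo', 5),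
--     ('nederland', 6), ('dutch', 6),
-- ]
--
-- _EMOJIS = ['\U0001F4D5', '\U0001F4D8', '\U0001F4D7', '\U0001F4D9',
--            '\U0001F4D4', '\U0001F5FA\uFE0F', '\U0001F4D6', '\U0001F4D8']
--
-- def detect_cover_emoji(file_name: str) -> str:
--     lower = file_name.lower()
--     best = 7
--     for kw, rank in _KEYWORD_RANK:
--         if kw in lower:
--             best = min(best, rank)
--     return _EMOJIS[best]
-- ===== Notes on version B (the rewrite author's own statement) =====
-- stated objective: alternative
-- what changed: Replaces the early-return if-elif cascade of grouped any() checks with one exhaustive pass over a flat keyword-to-priority map that aggregates the minimum matched priority and indexes an emoji array by it (7 = default).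
import Mathlib
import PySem

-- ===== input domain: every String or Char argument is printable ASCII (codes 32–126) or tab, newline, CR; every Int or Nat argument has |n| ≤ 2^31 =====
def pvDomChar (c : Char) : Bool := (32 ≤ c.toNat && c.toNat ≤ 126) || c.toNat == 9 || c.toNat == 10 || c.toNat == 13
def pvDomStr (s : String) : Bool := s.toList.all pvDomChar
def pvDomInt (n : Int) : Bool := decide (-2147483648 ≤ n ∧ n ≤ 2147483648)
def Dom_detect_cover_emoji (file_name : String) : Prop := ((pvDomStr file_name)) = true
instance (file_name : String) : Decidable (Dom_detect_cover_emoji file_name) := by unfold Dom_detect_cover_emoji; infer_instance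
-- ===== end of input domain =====

-- B replaces A's early-return if-elif cascade with an exhaustive min-priority aggregation over a flat keyword->rank map, then an emoji-array index (alternative, same cost).


-- ===== PORT A =====
def detect_cover_emoji (file_name : String) : String :=
  let lower := PySem.Str.lower file_name
  if ["wiskunde", "math", "rekenen"].any (fun w => PySem.Str.isIn w lower) then "📕"
  else if ["engels", "english"].any (fun w => PySem.Str.isIn w lower) then "📘"
  else if ["biologie", "biology", "bio"].any (fun w => PySem.Str.isIn w lower) then "📗"
  else if ["natuur", "physics", "scheikunde", "chemistry"].any (fun w => PySem.Str.isIn w lower) then "📙"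
  else if ["geschied", "history"].any (fun w => PySem.Str.isIn w lower) then "📔"
  else if ["aard", "geo"].any (fun w => PySem.Str.isIn w lower) then "🗺️"
  else if ["nederland", "dutch"].any (fun w => PySem.Str.isIn w lower) then "📖"
  else "📘"

-- ===== PORT B =====
-- flat keyword -> priority map (lower rank = higher priority)
def pvKeywordRank : List (String × Nat) :=
  [("wiskunde", 0), ("math", 0), ("rekenen", 0),
   ("engels", 1), ("english", 1),
   ("biologie", 2), ("biology", 2), ("bio", 2),
   ("natuur", 3), ("physics", 3), ("scheikunde", 3), ("chemistry", 3),
   ("geschied", 4), ("history", 4),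
   ("aard", 5), ("geo", 5),
   ("nederland", 6), ("dutch", 6)]

-- emoji array indexed by priority; index 7 is the default
def pvEmojis : List String := ["📕", "📘", "📗", "📙", "📔", "🗺️", "📖", "📘"]

-- the loop: exhaustive pass keeping the minimum matched rank (starting at 7)
def detect_cover_emoji_alt (file_name : String) : String :=
  let lower := PySem.Str.lower file_name
  let best := pvKeywordRank.foldl
    (fun acc p => if PySem.Str.isIn p.1 lower then min acc p.2 else acc) 7
  pvEmojis.getD best "📘"

-- ===== PRECONDITION & SPEC =====
def Spec_detect_cover_emoji (file_name : String) (out : String) : Prop := out = detect_cover_emoji_alt file_name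
instance (file_name : String) (out : String) : Decidable (Spec_detect_cover_emoji file_name out) := by unfold Spec_detect_cover_emoji; infer_instance

-- ===== CLAIM (what is proved, stated in full; the proofs are below) =====
def Claim_equal_detect_cover_emoji : Prop := ∀ (file_name : String), Dom_detect_cover_emoji file_name → Spec_detect_cover_emoji file_name (detect_cover_emoji file_name)

-- ===== LEMMAS AND PROOFS =====

-- folding B's min-step over a constant-rank keyword group collapses to a single any()-guarded min
theorem pv_fold_const (c : String → Bool) (r : Nat) (kws : List String) (acc : Nat) :
    List.foldl (fun acc p => if c p.1 then min acc p.2 else acc) acc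
      (kws.map (fun k => (k, r)))
    = if kws.any c then min acc r else acc := by
  induction kws generalizing acc with
  | nil => simp
  | cons k rest ih =>
    simp only [List.map_cons, List.foldl_cons, List.any_cons, ih]
    by_cases h : c k = true <;>
      simp [h]

theorem htab : pvKeywordRank =
    (["wiskunde", "math", "rekenen"].map (fun k => (k, 0)))
    ++ (["engels", "english"].map (fun k => (k, 1)))
    ++ (["biologie", "biology", "bio"].map (fun k => (k, 2)))
    ++ (["natuur", "physics", "scheikunde", "chemistry"].map (fun k => (k, 3)))
    ++ (["geschied", "history"].map (fun k => (k, 4)))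
    ++ (["aard", "geo"].map (fun k => (k, 5)))
    ++ (["nederland", "dutch"].map (fun k => (k, 6))) := rfl

-- ===== VERDICT (by name: the statement is the Claim_ definition above) =====
theorem detect_cover_emoji_spec : Claim_equal_detect_cover_emoji := by
  intro s _
  unfold Spec_detect_cover_emoji detect_cover_emoji detect_cover_emoji_alt
  simp only []
  rw [htab, List.foldl_append, List.foldl_append, List.foldl_append, List.foldl_append,
      List.foldl_append, List.foldl_append]
  rw [pv_fold_const (fun w => PySem.Str.isIn w (PySem.Str.lower s)),
      pv_fold_const (fun w => PySem.Str.isIn w (PySem.Str.lower s)),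
      pv_fold_const (fun w => PySem.Str.isIn w (PySem.Str.lower s)),
      pv_fold_const (fun w => PySem.Str.isIn w (PySem.Str.lower s)),
      pv_fold_const (fun w => PySem.Str.isIn w (PySem.Str.lower s)),
      pv_fold_const (fun w => PySem.Str.isIn w (PySem.Str.lower s)),
      pv_fold_const (fun w => PySem.Str.isIn w (PySem.Str.lower s))]
  by_cases h0 : List.any ["wiskunde", "math", "rekenen"] (fun w => PySem.Str.isIn w (PySem.Str.lower s)) = true <;>
  by_cases h1 : List.any ["engels", "english"] (fun w => PySem.Str.isIn w (PySem.Str.lower s)) = true <;>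
  by_cases h2 : List.any ["biologie", "biology", "bio"] (fun w => PySem.Str.isIn w (PySem.Str.lower s)) = true <;>
  by_cases h3 : List.any ["natuur", "physics", "scheikunde", "chemistry"] (fun w => PySem.Str.isIn w (PySem.Str.lower s)) = true <;>
  by_cases h4 : List.any ["geschied", "history"] (fun w => PySem.Str.isIn w (PySem.Str.lower s)) = true <;>
  by_cases h5 : List.any ["aard", "geo"] (fun w => PySem.Str.isIn w (PySem.Str.lower s)) = true <;>
  by_cases h6 : List.any ["nederland", "dutch"] (fun w => PySem.Str.isIn w (PySem.Str.lower s)) = true <;>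
    simp only [h0, h1, h2, h3, h4, h5, h6, Bool.not_eq_true] at * <;>
    simp [pvEmojis]
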